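-- pv_equiv track=rewrite | github.com/EZePiZy/Discrete-Maths-Classes | bool_sort.py | bool_sort
-- ===== SOURCE A (Python) =====
-- def bool_sort(lst):
--     lst_sorted = [None] * (len(lst) + 1)
--     count_T = 1
--     count_F = 1
--
--     for i in range(len(lst)):
--         if (lst[i] == False):
--             lst_sorted[count_F] = False
--             count_F += 1
--         else:
--             lst_sorted[len(lst) - count_T + 1] = True
--             count_T += 1
--
--     lst_sorted.pop(0)
--     return 'The sorted list is: ' + str(lst_sorted), 'The number of occurences of "False" is: ' + str(count_F - 1), 'The number of occurences of "True" is: ' + str(count_T - 1)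
-- ===== SOURCE B (Python) =====
-- def bool_sort(lst):
--     num_F = lst.count(False)
--     num_T = len(lst) - num_F
--     lst_sorted = [False] * num_F + [True] * num_T
--     return ('The sorted list is: ' + str(lst_sorted),
--             'The number of occurences of "False" is: ' + str(num_F),
--             'The number of occurences of "True" is: ' + str(num_T))
-- ===== Notes on version B (the rewrite author's own statement) =====
-- stated objective: simpler
-- what changed: Replaces the single-pass index-placement into a pre-allocated None buffer of length n+1 (with a dummy slot popped afterwards) by a count-first decomposition: count the Falses once, then build the sorted list by list replication of False then True.
import Mathlib
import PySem

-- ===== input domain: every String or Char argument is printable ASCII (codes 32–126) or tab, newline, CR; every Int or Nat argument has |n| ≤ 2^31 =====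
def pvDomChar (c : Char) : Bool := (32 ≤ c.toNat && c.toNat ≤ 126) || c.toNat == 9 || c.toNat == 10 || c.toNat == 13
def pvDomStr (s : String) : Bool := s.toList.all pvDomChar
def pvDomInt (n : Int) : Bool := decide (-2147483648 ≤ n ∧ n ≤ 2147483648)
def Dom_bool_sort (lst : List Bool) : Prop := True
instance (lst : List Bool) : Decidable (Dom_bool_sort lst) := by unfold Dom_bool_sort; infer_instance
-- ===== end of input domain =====

-- B replaces A's index-placement into a pre-allocated [None]*(n+1) buffer by a
-- count-first decomposition: count the Falses, then build the result by replication. Objective: simpler.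

-- ===== PORT A =====
-- str(x) for the buffer cells (None / False / True), exact for these three values
def pvReprCellA : Option Bool → String
  | none => "None"
  | some false => "False"
  | some true => "True"

-- str(list-of-cells): exact Python list repr for Option Bool cells
def pvListStrA (xs : List (Option Bool)) : String :=
  "[" ++ String.intercalate ", " (xs.map pvReprCellA) ++ "]"

-- the loop body; counters are ≥ 1 throughout in Python, so Nat counters are exact
def pvBodyA (lst : List Bool) (s : List (Option Bool) × Nat × Nat) (b : Bool) :
    List (Option Bool) × Nat × Nat :=
  if b == false then (s.1.set s.2.2 (some false), s.2.1, s.2.2 + 1)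
  else (s.1.set (lst.length - s.2.1 + 1) (some true), s.2.1 + 1, s.2.2)

-- lst_sorted.pop(0) and the three formatted return strings
def pvFinishA (st : List (Option Bool) × Nat × Nat) : String × String × String :=
  ("The sorted list is: " ++ pvListStrA (st.1.drop 1),
   "The number of occurences of \"False\" is: " ++ PySem.Int.toStr ((st.2.2 : Int) - 1),
   "The number of occurences of \"True\" is: " ++ PySem.Int.toStr ((st.2.1 : Int) - 1))

def bool_sort (lst : List Bool) : String × String × String :=
  -- lst_sorted = [None]*(len(lst)+1); count_T = 1; count_F = 1;
  -- for i in range(len(lst)): … lst[i] …  (i always in range, so pyGetD is exact)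
  pvFinishA ((PySem.List.pyRange 0 (PySem.List.len lst) 1).foldl
      (fun s i => pvBodyA lst s (PySem.List.pyGetD lst i false))
      (List.replicate (lst.length + 1) none, 1, 1))

-- ===== PORT B =====
-- str(b) for a bool
def pvReprBoolB (b : Bool) : String := if b then "True" else "False"

-- str(list-of-bools)
def pvListStrB (xs : List Bool) : String :=
  "[" ++ String.intercalate ", " (xs.map pvReprBoolB) ++ "]"

def bool_sort_alt (lst : List Bool) : String × String × String :=
  -- num_F = lst.count(False); num_T = len(lst) - num_F; [False]*num_F + [True]*num_T
  ("The sorted list is: "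
      ++ pvListStrB (List.replicate (lst.count false) false
          ++ List.replicate (lst.length - lst.count false) true),
   "The number of occurences of \"False\" is: " ++ PySem.Int.toStr ((lst.count false : Int)),
   "The number of occurences of \"True\" is: " ++ PySem.Int.toStr (((lst.length - lst.count false : Nat) : Int)))

-- ===== PRECONDITION & SPEC =====
def Spec_bool_sort (lst : List Bool) (out : String × String × String) : Prop := out = bool_sort_alt lst
instance (lst : List Bool) (out : String × String × String) : Decidable (Spec_bool_sort lst out) := by unfold Spec_bool_sort; infer_instance

-- ===== CLAIM (what is proved, stated in full; the proofs are below) =====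
def Claim_equal_bool_sort : Prop := ∀ (lst : List Bool), Dom_bool_sort lst → Spec_bool_sort lst (bool_sort lst)

-- ===== LEMMAS AND PROOFS =====

-- setting exactly at the length of the prefix replaces the head of the suffix
theorem pv_set_at_len {α : Type} (l₁ l₂ : List α) (x v : α) :
    (l₁ ++ x :: l₂).set l₁.length v = l₁ ++ v :: l₂ := by
  induction l₁ with
  | nil => rfl
  | cons a t ih => simp [ih]

theorem pv_count_add (lst : List Bool) : lst.count false + lst.count true = lst.length := by
  induction lst with
  | nil => rfl
  | cons b t ih => cases b <;> simp <;> omega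

-- replicate absorbs a leading copy of its element
theorem pv_rep_shift {α : Type} (n : Nat) (x : α) (l : List α) :
    List.replicate n x ++ x :: l = x :: (List.replicate n x ++ l) := by
  induction n with
  | zero => rfl
  | succ m ih => simp_all [List.replicate_succ]

-- loop invariant: after consuming `rest` from the shown state, the buffer is
-- none :: Falses ++ Trues and the counters have advanced by the respective counts
theorem pvLoopA (lst : List Bool) :
    ∀ (rest : List Bool) (f t : Nat), f + rest.length + t = lst.length →
    rest.foldl (pvBodyA lst)
      (none :: (List.replicate f (some false) ++ List.replicate rest.length (none : Option Bool)
          ++ List.replicate t (some true)), t + 1, f + 1)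
      = (none :: (List.replicate (f + rest.count false) (some false)
          ++ List.replicate (t + rest.count true) (some true)),
         t + rest.count true + 1, f + rest.count false + 1) := by
  intro rest
  induction rest with
  | nil => intro f t h; simp
  | cons b rest' ih =>
    intro f t h
    simp only [List.length_cons] at h
    simp only [List.foldl_cons, List.length_cons, List.count_cons]
    cases b with
    | false =>
      have hstep : pvBodyA lst
          (none :: (List.replicate f (some false) ++ List.replicate (rest'.length + 1) (none : Option Bool)
              ++ List.replicate t (some true)), t + 1, f + 1) false
          = (none :: (List.replicate (f + 1) (some false) ++ List.replicate rest'.length (none : Option Bool)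
              ++ List.replicate t (some true)), t + 1, f + 1 + 1) := by
        simp only [pvBodyA]
        rw [if_pos (by decide)]
        refine Prod.ext ?_ rfl
        have h1 : (none :: (List.replicate f (some false) ++ List.replicate (rest'.length + 1) (none : Option Bool)
              ++ List.replicate t (some true)))
            = (none :: List.replicate f (some false))
              ++ (none : Option Bool) :: (List.replicate rest'.length (none : Option Bool) ++ List.replicate t (some true)) := by
          simp [List.replicate_succ]
        have h2 : (none :: List.replicate f (some false) : List (Option Bool)).length = f + 1 := by simp
        simp only [h1]
        rw [← h2, pv_set_at_len]
        simp [List.replicate_succ, List.append_assoc, pv_rep_shift]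
      rw [hstep, ih (f + 1) t (by omega)]
      simp only [show ∀ c : Nat, f + 1 + c = f + (c + 1) from fun c => by omega]
      simp
    | true =>
      have hidx : lst.length - (t + 1) + 1 = f + rest'.length + 1 := by omega
      have hstep : pvBodyA lst
          (none :: (List.replicate f (some false) ++ List.replicate (rest'.length + 1) (none : Option Bool)
              ++ List.replicate t (some true)), t + 1, f + 1) true
          = (none :: (List.replicate f (some false) ++ List.replicate rest'.length (none : Option Bool)
              ++ List.replicate (t + 1) (some true)), t + 1 + 1, f + 1) := by
        simp only [pvBodyA]
        rw [if_neg (by simp)]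
        refine Prod.ext ?_ rfl
        have h1 : (none :: (List.replicate f (some false) ++ List.replicate (rest'.length + 1) (none : Option Bool)
              ++ List.replicate t (some true)))
            = (none :: (List.replicate f (some false) ++ List.replicate rest'.length (none : Option Bool)))
              ++ (none : Option Bool) :: List.replicate t (some true) := by
          simp [List.replicate_succ', List.append_assoc]
        have h2 : (none :: (List.replicate f (some false) ++ List.replicate rest'.length (none : Option Bool)) : List (Option Bool)).length
            = f + rest'.length + 1 := by simp
        simp only [h1]
        rw [hidx, ← h2, pv_set_at_len]
        simp [List.replicate_succ, List.append_assoc]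
      rw [hstep, ih f (t + 1) (by omega)]
      simp only [show ∀ c : Nat, t + 1 + c = t + (c + 1) from fun c => by omega]
      simp

-- ===== VERDICT (by name: the statement is the Claim_ definition above) =====
theorem bool_sort_spec : Claim_equal_bool_sort := by
  intro lst _
  show bool_sort lst = bool_sort_alt lst
  unfold bool_sort
  rw [PySem.List.foldl_pyRange_zero_pyGetD lst false (pvBodyA lst)]
  have h0 := pvLoopA lst lst 0 0 (by omega)
  simp only [Nat.zero_add, List.replicate_zero, List.append_nil, List.nil_append] at h0
  rw [List.replicate_succ, h0]
  have hcnt := pv_count_add lst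
  have hT : lst.length - lst.count false = lst.count true := by omega
  unfold pvFinishA bool_sort_alt
  simp only [hT]
  refine Prod.ext ?_ (Prod.ext ?_ ?_)
  · simp [pvListStrA, pvListStrB, pvReprCellA, pvReprBoolB, List.map_append, List.map_replicate]
  · simp
  · simp
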